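-- pv_equiv track=rewrite | github.com/rcoh/6.035 | tokenize.py | tokenize_raw
-- ===== SOURCE A (Python) =====
-- white_space = [' ', '\n', '\t', """\\"""]
--
-- separators = ['(', ')', '{', '}', '==', '!=', '>=', '!=', ',', ';']
--
-- def tokenize_raw(code, buff):
--     if not code:
--         return [buff]
--     elif code[0] in white_space:
--         return [buff] + tokenize_raw(code[1:], '')
--     elif code[0] in separators:
--         return [buff] + [code[0]]+ tokenize_raw(code[1:], '')
--     else:
--         return tokenize_raw(code[1:], buff + code[0])
-- ===== SOURCE B (Python) =====
-- WHITE_SPACE = frozenset(' \n\t\\')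
-- # A's separator table also lists '==', '!=', '>='; a single character can never
-- # equal a two-character string, so only the one-character separators can match.
-- SEPARATORS = frozenset('(){},;')
--
-- def tokenize_raw(code, buff):
--     tokens = []
--     cur = buff
--     for ch in code:
--         if ch in WHITE_SPACE:
--             tokens.append(cur)
--             cur = ''
--         elif ch in SEPARATORS:
--             tokens.append(cur)
--             tokens.append(ch)
--             cur = ''
--         else:
--             cur += ch
--     tokens.append(cur)
--     return tokens
-- ===== Notes on version B (the rewrite author's own statement) =====
-- stated objective: faster
-- what changed: Replaced the per-character recursion that slices the string and concatenates result lists with a single iterative pass over the characters maintaining a token list and a current buffer.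
import Mathlib
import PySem

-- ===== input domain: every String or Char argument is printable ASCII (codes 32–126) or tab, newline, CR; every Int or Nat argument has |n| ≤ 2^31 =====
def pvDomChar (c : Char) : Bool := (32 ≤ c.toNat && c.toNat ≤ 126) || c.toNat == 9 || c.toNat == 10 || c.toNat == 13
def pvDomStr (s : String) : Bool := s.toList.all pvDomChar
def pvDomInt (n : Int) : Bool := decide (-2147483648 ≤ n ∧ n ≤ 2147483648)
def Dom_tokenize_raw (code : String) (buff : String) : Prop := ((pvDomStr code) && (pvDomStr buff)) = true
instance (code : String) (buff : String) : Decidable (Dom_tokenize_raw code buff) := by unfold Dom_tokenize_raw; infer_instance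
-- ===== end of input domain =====

-- B replaces A's slice-and-recurse tokenizer by a single iterative pass with a
-- token accumulator and a current-buffer string (faster in a timing run).


-- ===== PORT A =====
-- white_space = [' ', '\n', '\t', """\\"""]
def whiteSpaceA : List String := [" ", "\n", "\t", "\\"]
-- separators = ['(', ')', '{', '}', '==', '!=', '>=', '!=', ',', ';']
def separatorsA : List String := ["(", ")", "{", "}", "==", "!=", ">=", "!=", ",", ";"]

-- literal recursion of A over the characters of code (code[0] / code[1:]),
-- with the one-character string code[0] tested for membership in the string lists
def tokenizeRecA : List Char → List Char → List String
  | [], buff => [String.ofList buff]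
  | c :: rest, buff =>
    if String.ofList [c] ∈ whiteSpaceA then
      [String.ofList buff] ++ tokenizeRecA rest []
    else if String.ofList [c] ∈ separatorsA then
      [String.ofList buff] ++ [String.ofList [c]] ++ tokenizeRecA rest []
    else
      tokenizeRecA rest (buff ++ [c])

def tokenize_raw (code : String) (buff : String) : List String :=
  tokenizeRecA code.toList buff.toList

-- ===== PORT B =====
def whiteSpaceB : List Char := [' ', '\n', '\t', '\\']
def separatorsB : List Char := ['(', ')', '{', '}', ',', ';']

-- one loop step of B: state = (tokens so far, current buffer)
def stepB (st : List String × List Char) (c : Char) : List String × List Char :=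
  if c ∈ whiteSpaceB then
    (st.1 ++ [String.ofList st.2], [])
  else if c ∈ separatorsB then
    (st.1 ++ [String.ofList st.2, String.ofList [c]], [])
  else
    (st.1, st.2 ++ [c])

def tokenize_raw_alt (code : String) (buff : String) : List String :=
  let st := code.toList.foldl stepB ([], buff.toList)
  st.1 ++ [String.ofList st.2]

-- ===== PRECONDITION & SPEC =====
def Spec_tokenize_raw (code : String) (buff : String) (out : List String) : Prop := out = tokenize_raw_alt code buff
instance (code : String) (buff : String) (out : List String) : Decidable (Spec_tokenize_raw code buff out) := by unfold Spec_tokenize_raw; infer_instance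

-- ===== CLAIM (what is proved, stated in full; the proofs are below) =====
def Claim_equal_tokenize_raw : Prop := ∀ (code : String) (buff : String), Dom_tokenize_raw code buff → Spec_tokenize_raw code buff (tokenize_raw code buff)

-- ===== LEMMAS AND PROOFS =====

theorem ws_mem_iff (c : Char) : String.ofList [c] ∈ whiteSpaceA ↔ c ∈ whiteSpaceB := by
  simp [whiteSpaceA, whiteSpaceB, String.ext_iff, String.toList_ofList]

theorem sep_mem_iff (c : Char) : String.ofList [c] ∈ separatorsA ↔ c ∈ separatorsB := by
  simp [separatorsA, separatorsB, String.ext_iff, String.toList_ofList]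

theorem foldl_eq_rec (code : List Char) : ∀ (toks : List String) (buff : List Char),
    (code.foldl stepB (toks, buff)).1 ++ [String.ofList (code.foldl stepB (toks, buff)).2]
      = toks ++ tokenizeRecA code buff := by
  induction code with
  | nil => intro toks buff; simp [tokenizeRecA]
  | cons c rest ih =>
    intro toks buff
    by_cases hw : c ∈ whiteSpaceB
    · simp [tokenizeRecA, stepB, hw, (ws_mem_iff c).2 hw, List.foldl_cons, ih]
    · by_cases hs : c ∈ separatorsB
      · simp [tokenizeRecA, stepB, hw, hs, (ws_mem_iff c).not.2 hw, (sep_mem_iff c).2 hs,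
          List.foldl_cons, ih]
      · simp [tokenizeRecA, stepB, hw, hs, (ws_mem_iff c).not.2 hw, (sep_mem_iff c).not.2 hs,
          List.foldl_cons, ih]

-- ===== VERDICT (by name: the statement is the Claim_ definition above) =====
theorem tokenize_raw_spec : Claim_equal_tokenize_raw := by
  intro code buff _
  unfold Spec_tokenize_raw tokenize_raw tokenize_raw_alt
  exact (foldl_eq_rec code.toList [] buff.toList).symm
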